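-- pv_equiv track=rewrite | github.com/linhdvu14/cp-sols | sols/CodeForces/2104_edu/B_Move_to_the_End.py | solve
-- ===== SOURCE A (Python) =====
-- def solve(N, A):
--     mx = [-1] * (N + 1)
--     for i, a in enumerate(A):
--         mx[i + 1] = max(mx[i], a)
--
--     res = []
--     s = 0
--     for i in range(N - 1, -1, -1):
--         s += A[i]
--         ans = max(s, s + mx[i] - A[i])
--         res.append(ans)
--
--     return res
-- ===== SOURCE B (Python) =====
-- def solve(N, A):
--     # Algebraic reformulation: since max(s, s + m - a) = (s - a) + max(a, m),
--     # the answer at index i is simply sum(A[i+1:]) + max(-1, A[0], ..., A[i]).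
--     # One forward pass computes that single sum per index; no candidate comparison
--     # and no prefix-max table. zip(..., strict=True) enforces the N == len(A)
--     # contract (A raises IndexError on a mismatch).
--     out = []
--     best = -1
--     rest = sum(A)
--     for _, a in zip(range(N), A, strict=True):
--         if a > best:
--             best = a
--         rest -= a
--         out.append(rest + best)
--     out.reverse()
--     return out
-- ===== Notes on version B (the rewrite author's own statement) =====
-- stated objective: alternative
-- what changed: Uses the identity max(s, s+m-a) = (s-a) + max(a,m) to eliminate A's per-index two-candidate maximum and its (N+1)-entry prefix-max table: B computes each answer as the single sum rest+best in one forward pass (suffix sum excluding A[i] plus running max including A[i]) and reverses at the end.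
import Mathlib
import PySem

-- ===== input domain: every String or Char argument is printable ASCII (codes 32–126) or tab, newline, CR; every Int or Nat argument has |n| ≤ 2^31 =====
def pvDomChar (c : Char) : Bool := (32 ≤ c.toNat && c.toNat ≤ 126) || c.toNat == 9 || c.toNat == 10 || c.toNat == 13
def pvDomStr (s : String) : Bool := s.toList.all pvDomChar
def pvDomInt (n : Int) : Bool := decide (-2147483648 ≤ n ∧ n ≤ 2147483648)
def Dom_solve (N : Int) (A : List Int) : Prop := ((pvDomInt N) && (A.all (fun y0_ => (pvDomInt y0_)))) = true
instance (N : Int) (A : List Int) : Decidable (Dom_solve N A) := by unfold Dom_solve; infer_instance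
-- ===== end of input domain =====

-- B drops A's per-index two-candidate maximum and prefix-max table via the identity
-- max(s, s+m-a) = (s-a) + max(a,m): each answer is the single sum rest+best in one forward pass.

-- ===== PORT A =====
-- mx = [-1]*(N+1); for i,a in enumerate(A): mx[i+1] = max(mx[i], a)
-- then s accumulates A[i] for i = N-1 .. 0, appending max(s, s + mx[i] - A[i]).
-- pyGetD/pySetD are the total forms of Python's indexing/assignment; Pre_solve keeps all indices in range.
def solve (N : Int) (A : List Int) : List Int :=
  let mx0 := PySem.List.pyRepeat [(-1 : Int)] (N + 1)
  let mx := (PySem.List.enumerate A 0).foldl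
    (fun mx p =>
      PySem.List.pySetD mx (p.1 + 1) (max (PySem.List.pyGetD mx p.1 (-1)) p.2)) mx0
  let st := (PySem.List.pyRange (N - 1) (-1) (-1)).foldl
    (fun (st : Int × List Int) i =>
      let s := st.1 + PySem.List.pyGetD A i 0
      let ans := max s (s + PySem.List.pyGetD mx i 0 - PySem.List.pyGetD A i 0)
      (s, st.2 ++ [ans])) ((0 : Int), ([] : List Int))
  st.2

-- ===== PORT B =====
-- best = -1; rest = sum(A); for _, a in zip(range(N), A, strict=True): best = max via if;
-- rest -= a; append rest + best; reverse at the end. zip's strict length check only raises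
-- (ValueError, outside Pre_solve); under Pre_solve the pairing is exactly List.zip.
def solve_alt (N : Int) (A : List Int) : List Int :=
  let st := ((PySem.List.pyRange 0 N 1).zip A).foldl
    (fun (st : Int × Int × List Int) p =>
      let a := p.2
      let best := if a > st.1 then a else st.1
      let rest := st.2.1 - a
      (best, rest, st.2.2 ++ [rest + best]))
    ((-1 : Int), A.sum, ([] : List Int))
  st.2.2.reverse

-- ===== PRECONDITION & SPEC =====
-- Pre_solve is exactly where the Python A returns: N must equal len(A) (otherwise an index
-- assignment/read raises IndexError), except that any negative N with an empty A also returns [].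
def Pre_solve (N : Int) (A : List Int) : Prop :=
  N = (A.length : Int) ∨ (N < 0 ∧ A = [])
instance (N : Int) (A : List Int) : Decidable (Pre_solve N A) := by
  unfold Pre_solve; infer_instance

def pvWitness_solve : Int × List Int := (3, [2, -1, 5])

def Spec_solve (N : Int) (A : List Int) (out : List Int) : Prop := out = solve_alt N A
instance (N : Int) (A : List Int) (out : List Int) : Decidable (Spec_solve N A out) := by
  unfold Spec_solve; infer_instance

-- ===== CLAIM (what is proved, stated in full; the proofs are below) =====
def Claim_equal_solve : Prop :=
  ∀ (N : Int) (A : List Int), Dom_solve N A → Pre_solve N A → Spec_solve N A (solve N A)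

-- ===== LEMMAS AND PROOFS =====

-- prefix max of the first i elements, with Python's -1 sentinel
def pvPm (A : List Int) (i : Nat) : Int := (A.take i).foldl max (-1)

-- the per-index answer A computes
def pvAns (A : List Int) (i : Nat) : Int :=
  let s := (A.drop i).sum
  max s (s + pvPm A i - A.getD i 0)

-- the per-index answer B computes
def pvAns2 (A : List Int) (i : Nat) : Int := (A.drop (i + 1)).sum + pvPm A (i + 1)

theorem pvPm_take (A : List Int) (i j : Nat) (h : i ≤ j) :
    pvPm (A.take j) i = pvPm A i := by
  simp [pvPm, List.take_take, Nat.min_eq_left h]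

theorem pvPm_snoc (B : List Int) (a : Int) :
    pvPm (B ++ [a]) (B.length + 1) = max (pvPm B B.length) a := by
  simp only [pvPm, List.take_append, List.foldl_append]
  rw [List.take_of_length_le (by omega), List.take_of_length_le (le_refl _)]
  simp

-- the mx-building loop produces the prefix-max table (padded with untouched -1 cells)
theorem mx_loop (A : List Int) (m : Nat) (hm : A.length < m) :
    (PySem.List.enumerate A 0).foldl
      (fun mx p =>
        PySem.List.pySetD mx (p.1 + 1) (max (PySem.List.pyGetD mx p.1 (-1)) p.2))
      (List.replicate m (-1 : Int))
    = (List.range (A.length + 1)).map (pvPm A)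
        ++ List.replicate (m - (A.length + 1)) (-1 : Int) := by
  induction A using List.reverseRecOn with
  | nil =>
    cases m with
    | zero => omega
    | succ k => simp [pvPm, List.replicate_succ]
  | append_singleton B a ih =>
    have hB : B.length < m := by simp at hm; omega
    simp only [List.length_append, List.length_cons, List.length_nil] at hm ⊢
    rw [PySem.List.enumerate_append, List.foldl_append, ih hB]
    simp only [PySem.List.enumerate_cons, PySem.List.enumerate_nil, List.foldl_cons,
      List.foldl_nil]
    -- the read at index B.length hits the last mapped cell
    have hlen1 : (List.range (B.length + 1)).length = B.length + 1 := by simp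
    have hread : PySem.List.pyGetD
        ((List.range (B.length + 1)).map (pvPm B)
          ++ List.replicate (m - (B.length + 1)) (-1 : Int))
        ((0 : Int) + (B.length : Int)) (-1) = pvPm B B.length := by
      have : ((0 : Int) + (B.length : Int)) = ((B.length : Nat) : Int) := by ring
      rw [this, PySem.List.pyGetD_natCast]
      rw [List.getD_eq_getElem?_getD, List.getElem?_append_left (by simp)]
      simp
    rw [hread]
    -- the write at index B.length + 1 hits the first padding cell
    have hwrite : ((0 : Int) + (B.length : Int) + 1) = (((B.length + 1 : Nat)) : Int) := by
      push_cast; ring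
    rw [hwrite, PySem.List.pySetD_natCast]
    -- now both sides are concrete lists
    have hpad : m - (B.length + 1) = (m - (B.length + 2)) + 1 := by omega
    rw [hpad, List.replicate_succ]
    rw [List.set_append_right _ _ (by simp)]
    simp only [hlen1, List.length_map]
    have : B.length + 1 - (B.length + 1) = 0 := by omega
    rw [this, List.set_cons_zero]
    have hr : List.range (B.length + 1 + 1) = List.range (B.length + 1) ++ [B.length + 1] := by
      rw [List.range_succ]
    rw [hr, List.map_append]
    have hmap : (List.range (B.length + 1)).map (pvPm (B ++ [a]))
        = (List.range (B.length + 1)).map (pvPm B) := by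
      apply List.map_congr_left
      intro i hi
      simp only [List.mem_range] at hi
      have : pvPm (B ++ [a]) i = pvPm B i := by
        have h1 : ((B ++ [a]).take B.length) = B := by simp
        calc pvPm (B ++ [a]) i = pvPm ((B ++ [a]).take B.length) i :=
              (pvPm_take _ i B.length (by omega)).symm
          _ = pvPm B i := by rw [h1]
      exact this
    rw [hmap]
    simp [pvPm_snoc]

-- reading the finished table inside range gives pvPm
theorem mx_read (A : List Int) (i : Nat) (hi : i ≤ A.length) :
    PySem.List.pyGetD
      ((List.range (A.length + 1)).map (pvPm A)) ((i : Nat) : Int) 0 = pvPm A i := by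
  rw [PySem.List.pyGetD_natCast]
  rw [List.getD_eq_getElem?_getD]
  rw [List.getElem?_map]
  simp [Nat.lt_succ_of_le hi]

-- drop n A = A[n] :: drop (n+1) A, as a sum identity
theorem drop_sum_step (A : List Int) (n : Nat) (hn : n < A.length) :
    (A.drop n).sum = A.getD n 0 + (A.drop (n + 1)).sum := by
  have hgd : A.getD n 0 = A[n] := by
    simp [List.getD_eq_getElem?_getD, List.getElem?_eq_getElem hn]
  rw [hgd, List.drop_eq_getElem_cons hn, List.sum_cons]

-- A's backward loop, abstracted: the table reads are pvPm
theorem back_loop (A : List Int) (mx : List Int)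
    (hmx : ∀ i : Nat, i < A.length → PySem.List.pyGetD mx ((i : Nat) : Int) 0 = pvPm A i)
    (n : Nat) (hn : n ≤ A.length) (r : List Int) :
    ((PySem.List.pyRange ((n : Int) - 1) (-1) (-1)).foldl
      (fun (st : Int × List Int) i =>
        let s := st.1 + PySem.List.pyGetD A i 0
        let ans := max s (s + PySem.List.pyGetD mx i 0 - PySem.List.pyGetD A i 0)
        (s, st.2 ++ [ans])) ((A.drop n).sum, r)).2
    = r ++ ((List.range n).reverse.map (pvAns A)) := by
  induction n generalizing r with
  | zero =>
    rw [PySem.List.pyRange_neg_one_eq_nil (by omega)]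
    simp
  | succ k ih =>
    have hk : k < A.length := by omega
    have hcons : PySem.List.pyRange (((k + 1 : Nat) : Int) - 1) (-1) (-1)
        = ((k : Nat) : Int) :: PySem.List.pyRange (((k : Nat) : Int) - 1) (-1) (-1) := by
      rw [PySem.List.pyRange_neg_one_cons (by push_cast; omega)]
      push_cast; ring_nf
    rw [hcons, List.foldl_cons]
    have hA : PySem.List.pyGetD A ((k : Nat) : Int) 0 = A.getD k 0 := by
      rw [PySem.List.pyGetD_natCast]
    simp only [hA, hmx k hk]
    have hs : (A.drop (k + 1)).sum + A.getD k 0 = (A.drop k).sum := by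
      rw [drop_sum_step A k hk]; ring
    rw [hs]
    have := ih (by omega) (r ++ [max (A.drop k).sum ((A.drop k).sum + pvPm A k - A.getD k 0)])
    rw [this]
    rw [List.range_succ, List.reverse_append]
    simp [pvAns]

-- A's per-index answer equals B's single sum: max(s, s+m-a) = (s-a) + max(a,m)
theorem pvAns_eq_pvAns2 (A : List Int) (i : Nat) (hi : i < A.length) :
    pvAns A i = pvAns2 A i := by
  have hgd : A.getD i 0 = A[i] := by
    simp [List.getD_eq_getElem?_getD, List.getElem?_eq_getElem hi]
  have hts : A.take (i + 1) = A.take i ++ [A[i]] := by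
    rw [List.take_add_one]
    simp [List.getElem?_eq_getElem hi]
  have hpm : pvPm A (i + 1) = max (pvPm A i) A[i] := by
    simp only [pvPm, hts, List.foldl_append, List.foldl_cons, List.foldl_nil]
  have hsum : (A.drop i).sum = A[i] + (A.drop (i + 1)).sum := by
    rw [drop_sum_step A i hi, hgd]
  simp only [pvAns, pvAns2, hgd, hpm, hsum]
  rcases le_total (pvPm A i) A[i] with h | h
  · rw [max_eq_right h, max_eq_left (by omega)]; ring
  · rw [max_eq_left h, max_eq_right (by omega)]; ring

-- B's forward loop invariant
theorem fwd_loop (A : List Int) (n : Nat) (hn : n ≤ A.length) :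
    ((A.take n).foldl
      (fun (st : Int × Int × List Int) a =>
        let best := if a > st.1 then a else st.1
        let rest := st.2.1 - a
        (best, rest, st.2.2 ++ [rest + best]))
      ((-1 : Int), A.sum, ([] : List Int)))
    = (pvPm A n, (A.drop n).sum, (List.range n).map (pvAns2 A)) := by
  induction n with
  | zero => simp [pvPm]
  | succ k ih =>
    have hk : k < A.length := by omega
    have hts : A.take (k + 1) = A.take k ++ [A[k]] := by
      rw [List.take_add_one]
      simp [List.getElem?_eq_getElem hk]
    rw [hts, List.foldl_append, ih (by omega)]
    simp only [List.foldl_cons, List.foldl_nil]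
    have hgd : A.getD k 0 = A[k] := by
      simp [List.getD_eq_getElem?_getD, List.getElem?_eq_getElem hk]
    have hsum : (A.drop k).sum - A[k] = (A.drop (k + 1)).sum := by
      rw [drop_sum_step A k hk, hgd]; ring
    have hpm : pvPm A (k + 1) = max (pvPm A k) A[k] := by
      simp only [pvPm, hts, List.foldl_append, List.foldl_cons, List.foldl_nil]
    refine Prod.ext ?_ (Prod.ext ?_ ?_)
    · show (if A[k] > pvPm A k then A[k] else pvPm A k) = pvPm A (k + 1)
      rw [hpm]
      rcases le_or_gt A[k] (pvPm A k) with h | h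
      · rw [if_neg (by omega), max_eq_left h]
      · rw [if_pos (by omega), max_eq_right (le_of_lt h)]
    · exact hsum
    · show (List.range k).map (pvAns2 A)
          ++ [(A.drop k).sum - A[k] + (if A[k] > pvPm A k then A[k] else pvPm A k)]
        = (List.range (k + 1)).map (pvAns2 A)
      rw [List.range_succ, List.map_append]
      congr 1
      simp only [List.map_cons, List.map_nil, pvAns2, hsum, hpm]
      congr 2
      rcases le_or_gt A[k] (pvPm A k) with h | h
      · rw [if_neg (by omega), max_eq_left h]
      · rw [if_pos (by omega), max_eq_right (le_of_lt h)]

-- B's fold over zip pairs only reads the second component: it is a fold over the seconds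
theorem fwd_zip (l : List (Int × Int)) (init : Int × Int × List Int) :
    l.foldl (fun (st : Int × Int × List Int) p =>
      let a := p.2
      let best := if a > st.1 then a else st.1
      let rest := st.2.1 - a
      (best, rest, st.2.2 ++ [rest + best])) init
  = (l.map Prod.snd).foldl (fun (st : Int × Int × List Int) a =>
      let best := if a > st.1 then a else st.1
      let rest := st.2.1 - a
      (best, rest, st.2.2 ++ [rest + best])) init := by
  induction l generalizing init with
  | nil => rfl
  | cons x xs ih => simp only [List.foldl_cons, List.map_cons]; exact ih _

-- main-case equality: N = len(A)
theorem solve_eq_of_len (A : List Int) :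
    solve ((A.length : Nat) : Int) A = solve_alt ((A.length : Nat) : Int) A := by
  unfold solve solve_alt
  simp only []
  have hrep : PySem.List.pyRepeat [(-1 : Int)] (((A.length : Nat) : Int) + 1)
      = List.replicate (A.length + 1) (-1 : Int) := by
    rw [PySem.List.pyRepeat_singleton]
    have h1 : (((A.length : Nat) : Int) + 1).toNat = A.length + 1 := by omega
    rw [h1]
  rw [hrep]
  have hmx := mx_loop A (A.length + 1) (by omega)
  simp only [Nat.sub_self, List.replicate_zero, List.append_nil] at hmx
  rw [hmx]
  have hback := back_loop A ((List.range (A.length + 1)).map (pvPm A))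
    (fun i hi => mx_read A i (le_of_lt hi)) A.length (le_refl _) []
  simp only [List.drop_length, List.sum_nil] at hback
  rw [hback, List.nil_append]
  have hzip : ((PySem.List.pyRange 0 ((A.length : Nat) : Int) 1).zip A).map Prod.snd = A := by
    apply List.map_snd_zip
    rw [PySem.List.length_pyRange_one]
    omega
  rw [fwd_zip, hzip]
  have hfwd := fwd_loop A A.length (le_refl _)
  rw [List.take_length] at hfwd
  rw [hfwd]
  rw [← List.map_reverse]
  apply List.map_congr_left
  intro i hi
  exact pvAns_eq_pvAns2 A i (by simpa using hi)

-- ===== VERDICT (by name: the statement is the Claim_ definition above) =====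
theorem solve_spec : Claim_equal_solve := by
  intro N A _ hpre
  unfold Spec_solve
  rcases hpre with h | ⟨hneg, hA⟩
  · subst h
    exact solve_eq_of_len A
  · subst hA
    unfold solve solve_alt
    rw [PySem.List.pyRange_neg_one_eq_nil (by omega),
      PySem.List.pyRange_one_eq_nil (by omega)]
    simp
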